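-- pv_equiv track=rewrite | github.com/Chao-hu-Lab/XIC_Extractor | tools/diagnostics/targeted_gt_alignment_audit.py | _cells_by_sample_in_review_range
-- ===== SOURCE A (Python) =====
-- from collections import Counter, defaultdict
--
-- def _cells_by_sample_in_review_range(
--     cell_rows: list[dict[str, str]],
--     review_index: dict[str, dict[str, str]],
-- ) -> dict[str, tuple[dict[str, str], ...]]:
--     grouped: dict[str, list[dict[str, str]]] = defaultdict(list)
--     for cell in cell_rows:
--         if cell.get("feature_family_id") not in review_index:
--             continue
--         grouped[cell["sample_stem"]].append(cell)
--     return {sample: tuple(rows) for sample, rows in grouped.items()}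
-- ===== SOURCE B (Python) =====
-- def _cells_by_sample_in_review_range(
--     cell_rows: list[dict[str, str]],
--     review_index: dict[str, dict[str, str]],
-- ) -> dict[str, tuple[dict[str, str], ...]]:
--     passing = [c for c in cell_rows if c.get("feature_family_id") in review_index]
--     order = dict.fromkeys(c["sample_stem"] for c in passing)
--     return {s: tuple(c for c in passing if c["sample_stem"] == s) for s in order}
-- ===== Notes on version B (the rewrite author's own statement) =====
-- stated objective: idiomatic
-- what changed: Replaces the defaultdict-append accumulation loop by a declarative pipeline: filter the passing cells once, take the first-occurrence-ordered distinct sample stems (dict.fromkeys), and build each group with one comprehension scan per distinct sample.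
import Mathlib
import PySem

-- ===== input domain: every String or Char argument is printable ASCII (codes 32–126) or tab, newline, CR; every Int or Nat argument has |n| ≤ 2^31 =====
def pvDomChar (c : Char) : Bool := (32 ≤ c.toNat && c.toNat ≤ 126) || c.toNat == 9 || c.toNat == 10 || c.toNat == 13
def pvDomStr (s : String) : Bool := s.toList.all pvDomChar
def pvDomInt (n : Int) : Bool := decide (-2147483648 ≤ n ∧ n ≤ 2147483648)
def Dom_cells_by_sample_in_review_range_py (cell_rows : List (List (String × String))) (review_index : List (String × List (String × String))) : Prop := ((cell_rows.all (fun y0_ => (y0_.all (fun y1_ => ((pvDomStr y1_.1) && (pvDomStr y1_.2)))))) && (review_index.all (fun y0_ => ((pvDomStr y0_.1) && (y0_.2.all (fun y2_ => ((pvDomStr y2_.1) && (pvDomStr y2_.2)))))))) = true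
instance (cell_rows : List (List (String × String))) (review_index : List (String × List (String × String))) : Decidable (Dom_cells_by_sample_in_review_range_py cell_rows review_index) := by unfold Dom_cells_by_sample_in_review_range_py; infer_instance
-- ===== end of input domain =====

-- B replaces A's defaultdict accumulation by filter + ordered key dedup + one comprehension per sample
-- (objective: simpler/idiomatic; not faster). Equivalence is about the return value; neither mutates its arguments.

-- ===== PORT A =====
-- cell.get("feature_family_id") not in review_index  (None is never a str key, so a missing key fails the test)
def pvKeepA (review_index : List (String × List (String × String))) (cell : List (String × String)) : Bool :=
  match PySem.Dict.get? (PySem.Dict.mk cell) "feature_family_id" with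
  | some v => (PySem.Dict.mk review_index).contains v
  | none => false

def cells_by_sample_in_review_range_py (cell_rows : List (List (String × String))) (review_index : List (String × List (String × String))) : List (String × List (List (String × String))) :=
  -- grouped = defaultdict(list); for cell: if keep: grouped[cell["sample_stem"]].append(cell)
  -- cell["sample_stem"] raises KeyError when absent: Pre_ excludes that; getD "" stands in outside Pre_.
  let grouped : PySem.Dict String (List (List (String × String))) :=
    cell_rows.foldl (fun g cell =>
      if pvKeepA review_index cell then
        g.modify (PySem.Dict.getD (PySem.Dict.mk cell) "sample_stem" "") [] (· ++ [cell])
      else g) PySem.Dict.empty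
  -- {sample: tuple(rows) for sample, rows in grouped.items()}  (tuple() is the identity on the ported list)
  grouped.items.map (fun p => (p.1, p.2))

-- ===== PORT B =====
def pvStemB (cell : List (String × String)) : String :=
  PySem.Dict.getD (PySem.Dict.mk cell) "sample_stem" ""

def cells_by_sample_in_review_range_py_alt (cell_rows : List (List (String × String))) (review_index : List (String × List (String × String))) : List (String × List (List (String × String))) :=
  -- passing = [c for c in cell_rows if c.get("feature_family_id") in review_index]
  let passing := cell_rows.filter (fun c =>
    match PySem.Dict.get? (PySem.Dict.mk c) "feature_family_id" with
    | some v => (PySem.Dict.mk review_index).contains v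
    | none => false)
  -- order = dict.fromkeys(c["sample_stem"] for c in passing)
  let order := PySem.List.dedup (passing.map pvStemB)
  -- {s: tuple(c for c in passing if c["sample_stem"] == s) for s in order}
  order.map (fun s => (s, passing.filter (fun c => pvStemB c == s)))

-- ===== PRECONDITION & SPEC =====
-- Pre_ excludes exactly the inputs where A raises KeyError: a cell passing the review-index
-- filter but lacking the "sample_stem" key (B raises there too).
def Pre_cells_by_sample_in_review_range_py (cell_rows : List (List (String × String))) (review_index : List (String × List (String × String))) : Prop :=
  ∀ cell ∈ cell_rows, pvKeepA review_index cell = true → (PySem.Dict.mk cell).contains "sample_stem" = true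
instance (cell_rows : List (List (String × String))) (review_index : List (String × List (String × String))) : Decidable (Pre_cells_by_sample_in_review_range_py cell_rows review_index) := by unfold Pre_cells_by_sample_in_review_range_py; infer_instance

def pvWitness_cells_by_sample_in_review_range_py : (List (List (String × String))) × (List (String × List (String × String))) :=
  ([[("feature_family_id", "f1"), ("sample_stem", "s1")], [("feature_family_id", "zz")]],
   [("f1", [("note", "ok")])])

def Spec_cells_by_sample_in_review_range_py (cell_rows : List (List (String × String))) (review_index : List (String × List (String × String))) (out : List (String × List (List (String × String)))) : Prop := out = cells_by_sample_in_review_range_py_alt cell_rows review_index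
instance (cell_rows : List (List (String × String))) (review_index : List (String × List (String × String))) (out : List (String × List (List (String × String)))) : Decidable (Spec_cells_by_sample_in_review_range_py cell_rows review_index out) := by unfold Spec_cells_by_sample_in_review_range_py; infer_instance

-- ===== CLAIM (what is proved, stated in full; the proofs are below) =====
def Claim_equal_cells_by_sample_in_review_range_py : Prop := ∀ (cell_rows : List (List (String × String))) (review_index : List (String × List (String × String))), Dom_cells_by_sample_in_review_range_py cell_rows review_index → Pre_cells_by_sample_in_review_range_py cell_rows review_index → Spec_cells_by_sample_in_review_range_py cell_rows review_index (cells_by_sample_in_review_range_py cell_rows review_index)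

-- ===== LEMMAS AND PROOFS =====

-- folding with an if-guard equals folding over the filtered list
theorem pv_foldl_guard {α β : Type} (p : α → Bool) (f : β → α → β) :
    ∀ (l : List α) (b : β),
      l.foldl (fun g c => if p c then f g c else g) b = (l.filter p).foldl f b := by
  intro l
  induction l with
  | nil => intro b; rfl
  | cons x xs ih =>
    intro b
    by_cases h : p x = true
    · simp [h, ih]
    · simp [h, ih]

theorem pv_items_grouped (l : List (List (String × String))) :
    (l.foldl (fun (g : PySem.Dict String (List (List (String × String)))) cell =>
        g.modify (pvStemB cell) [] (· ++ [cell])) PySem.Dict.empty).items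
      = (PySem.List.dedup (l.map pvStemB)).map
          (fun s => (s, l.filter (fun c => pvStemB c == s))) := by
  set D := l.foldl (fun (g : PySem.Dict String (List (List (String × String)))) cell =>
        g.modify (pvStemB cell) [] (· ++ [cell])) PySem.Dict.empty with hD
  have hnd : D.keys.Nodup := by
    rw [hD]
    exact PySem.Dict.nodup_keys_foldl_modify_key l pvStemB [] (fun _ cell => (· ++ [cell])) _
      PySem.Dict.nodup_keys_empty
  have hkeys : D.keys = PySem.List.dedup (l.map pvStemB) := by
    rw [hD, PySem.Dict.keys_foldl_modify_key, PySem.Dict.keys_empty,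
      PySem.Set.update_nil_left, PySem.List.dedup_eq_ofList]
  have hget : ∀ s, D.getD s [] = l.filter (fun c => pvStemB c == s) := by
    intro s
    have hfold : D = (l.map (fun c => (pvStemB c, c))).foldl
        (fun (g : PySem.Dict String (List (List (String × String)))) p =>
          g.modify p.1 [] (· ++ [p.2])) PySem.Dict.empty := by
      rw [hD, List.foldl_map]
    rw [hfold, PySem.Dict.getD_foldl_modify_append]
    simp [List.filter_map, Function.comp_def]
  rw [PySem.Dict.items_eq_map_keys D hnd [], hkeys]
  exact List.map_congr_left (fun s _ => by rw [hget s])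

-- ===== VERDICT (by name: the statement is the Claim_ definition above) =====
theorem cells_by_sample_in_review_range_py_spec : Claim_equal_cells_by_sample_in_review_range_py := by
  intro cell_rows review_index _ _
  show _ = _
  unfold cells_by_sample_in_review_range_py cells_by_sample_in_review_range_py_alt
  simp only []
  rw [pv_foldl_guard (pvKeepA review_index)]
  have hfilt : cell_rows.filter (pvKeepA review_index)
      = cell_rows.filter (fun c =>
          match PySem.Dict.get? (PySem.Dict.mk c) "feature_family_id" with
          | some v => (PySem.Dict.mk review_index).contains v
          | none => false) := rfl
  rw [show (fun (g : PySem.Dict String (List (List (String × String)))) cell =>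
        g.modify (PySem.Dict.getD (PySem.Dict.mk cell) "sample_stem" "") [] (· ++ [cell]))
      = (fun g cell => g.modify (pvStemB cell) [] (· ++ [cell])) from rfl]
  rw [pv_items_grouped, ← hfilt]
  simp
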